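-- pv_equiv track=rewrite | github.com/WooyoungNa/P | app.py | latest_localized_text
-- ===== SOURCE A (Python) =====
-- def safe_int(v: str | None, default: int = 0) -> int:
--     try:
--         return int(v or default)
--     except ValueError:
--         return default
--
-- def latest_localized_text(rows: list[dict[str, str]], id_key: str, text_key: str, lang_id: str, order_key: str) -> dict[str, str]:
--     out: dict[str, tuple[int, str]] = {}
--     for r in rows:
--         if r.get("local_language_id") != lang_id:
--             continue
--         text = (r.get(text_key) or "").replace("\n", " ").strip()
--         if not text:
--             continue
--         oid = safe_int(r.get(order_key), 0)
--         key = r[id_key]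
--         prev = out.get(key)
--         if prev is None or oid >= prev[0]:
--             out[key] = (oid, text)
--     return {k: v[1] for k, v in out.items()}
-- ===== SOURCE B (Python) =====
-- def safe_int(v: str | None, default: int = 0) -> int:
--     try:
--         return int(v or default)
--     except ValueError:
--         return default
--
-- def latest_localized_text(rows, id_key, text_key, lang_id, order_key):
--     # pass 1: group the cleaned (order, text) pairs of valid rows by id
--     groups: dict[str, list[tuple[int, str]]] = {}
--     for r in rows:
--         if r.get("local_language_id") != lang_id:
--             continue
--         text = (r.get(text_key) or "").replace("\n", " ").strip()
--         if not text:
--             continue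
--         groups.setdefault(r[id_key], []).append((safe_int(r.get(order_key), 0), text))
--     # pass 2: per group, pick the last pair attaining the maximal order
--     out = {}
--     for k, g in groups.items():
--         best = g[0]
--         for p in g[1:]:
--             if p[0] >= best[0]:
--                 best = p
--         out[k] = best[1]
--     return out
-- ===== Notes on version B (the rewrite author's own statement) =====
-- stated objective: alternative
-- what changed: Replaces A's single-pass dict of (order,text) with running best-so-far overwrites by a two-pass group-by: collect each id's cleaned (order,text) pairs in a dict of lists, then reduce every group to the last pair attaining the maximal order.
import Mathlib
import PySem

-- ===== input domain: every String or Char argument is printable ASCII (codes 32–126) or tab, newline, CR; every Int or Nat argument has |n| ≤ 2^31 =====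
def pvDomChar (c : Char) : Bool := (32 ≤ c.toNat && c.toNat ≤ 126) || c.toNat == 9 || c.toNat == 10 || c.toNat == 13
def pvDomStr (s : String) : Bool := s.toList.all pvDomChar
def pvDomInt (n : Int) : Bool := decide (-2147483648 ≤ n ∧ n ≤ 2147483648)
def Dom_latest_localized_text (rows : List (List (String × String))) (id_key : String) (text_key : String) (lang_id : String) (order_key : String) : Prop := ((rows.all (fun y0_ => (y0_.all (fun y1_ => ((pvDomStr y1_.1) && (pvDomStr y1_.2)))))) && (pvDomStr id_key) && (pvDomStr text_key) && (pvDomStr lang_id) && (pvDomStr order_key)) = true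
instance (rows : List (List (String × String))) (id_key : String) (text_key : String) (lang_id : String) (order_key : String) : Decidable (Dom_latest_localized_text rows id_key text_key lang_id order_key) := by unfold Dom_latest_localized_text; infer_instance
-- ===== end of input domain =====

-- B replaces A's single-pass running-best dict with a two-pass group-by (dict of per-id lists, then a reduce per group); same O(n) cost, return values proved equal on Pre_.

-- shared helpers mirroring the Python lines both programs share (rows are dicts: lookup = first match)
def pvRowGet? (r : List (String × String)) (k : String) : Option String :=
  (r.find? (fun p => p.1 == k)).map (·.2)

-- safe_int(v, 0) = int(v or 0), ValueError -> 0
def pvSafeInt (v : Option String) : Int :=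
  match v with
  | none => 0
  | some s => if s = "" then 0 else (PySem.Int.ofStr? s).getD 0

-- (x or "").replace("\n", " ").strip()
def pvClean (o : Option String) : String :=
  PySem.Str.strip (PySem.Str.replace (o.getD "") "\n" " ")

-- ===== PORT A =====
def latest_localized_text (rows : List (List (String × String))) (id_key : String) (text_key : String) (lang_id : String) (order_key : String) : List (String × String) :=
  let out : PySem.Dict String (Int × String) := rows.foldl (fun d r =>
    if pvRowGet? r "local_language_id" ≠ some lang_id then d
    else
      let text := pvClean (pvRowGet? r text_key)
      if text = "" then d
      else
        let oid := pvSafeInt (pvRowGet? r order_key)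
        match pvRowGet? r id_key with
        | none => d  -- Python raises KeyError here; such inputs are excluded by Pre_
        | some key =>
          match d.get? key with
          | none => d.insert key (oid, text)
          | some prev => if oid ≥ prev.1 then d.insert key (oid, text) else d) PySem.Dict.empty
  -- {k: v[1] for k, v in out.items()}
  (out.items.foldl (fun d kv => d.insert kv.1 kv.2.2) (PySem.Dict.empty : PySem.Dict String String)).items

-- ===== PORT B =====
def latest_localized_text_alt (rows : List (List (String × String))) (id_key : String) (text_key : String) (lang_id : String) (order_key : String) : List (String × String) :=
  let groups : PySem.Dict String (List (Int × String)) := rows.foldl (fun d r =>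
    if pvRowGet? r "local_language_id" ≠ some lang_id then d
    else
      let text := pvClean (pvRowGet? r text_key)
      if text = "" then d
      else
        match pvRowGet? r id_key with
        | none => d  -- Python raises KeyError here; such inputs are excluded by Pre_
        | some key => d.modify key [] (fun g => g ++ [(pvSafeInt (pvRowGet? r order_key), text)])) PySem.Dict.empty
  let out : PySem.Dict String String := groups.items.foldl (fun d kg =>
    match kg.2 with
    | [] => d  -- groups never stores an empty list
    | p0 :: rest => d.insert kg.1 (rest.foldl (fun best p => if p.1 ≥ best.1 then p else best) p0).2) PySem.Dict.empty
  out.items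

-- ===== PRECONDITION & SPEC =====
-- Pre_ excludes exactly the inputs where a row passing the language/text filters lacks id_key: there the Python A (and B) raises KeyError.
def Pre_latest_localized_text (rows : List (List (String × String))) (id_key : String) (text_key : String) (lang_id : String) (order_key : String) : Prop :=
  ∀ r ∈ rows, pvRowGet? r "local_language_id" = some lang_id →
    pvClean (pvRowGet? r text_key) ≠ "" → (pvRowGet? r id_key).isSome = true

instance (rows : List (List (String × String))) (id_key : String) (text_key : String) (lang_id : String) (order_key : String) : Decidable (Pre_latest_localized_text rows id_key text_key lang_id order_key) := by unfold Pre_latest_localized_text; infer_instance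

def pvWitness_latest_localized_text : (List (List (String × String))) × String × String × String × String :=
  ([[("local_language_id", "9"), ("id", "1"), ("t", "hi"), ("o", "2")],
    [("local_language_id", "9"), ("id", "1"), ("t", "bye"), ("o", "2")]], "id", "t", "9", "o")

def Spec_latest_localized_text (rows : List (List (String × String))) (id_key : String) (text_key : String) (lang_id : String) (order_key : String) (out : List (String × String)) : Prop := out = latest_localized_text_alt rows id_key text_key lang_id order_key
instance (rows : List (List (String × String))) (id_key : String) (text_key : String) (lang_id : String) (order_key : String) (out : List (String × String)) : Decidable (Spec_latest_localized_text rows id_key text_key lang_id order_key out) := by unfold Spec_latest_localized_text; infer_instance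

-- ===== CLAIM (what is proved, stated in full; the proofs are below) =====
def Claim_equal_latest_localized_text : Prop := ∀ (rows : List (List (String × String))) (id_key : String) (text_key : String) (lang_id : String) (order_key : String), Dom_latest_localized_text rows id_key text_key lang_id order_key → Pre_latest_localized_text rows id_key text_key lang_id order_key → Spec_latest_localized_text rows id_key text_key lang_id order_key (latest_localized_text rows id_key text_key lang_id order_key)

-- ===== LEMMAS AND PROOFS =====

-- the cleaned triples (id, (order, text)) of the rows passing all filters (including having id_key)
def pvPass (id_key text_key lang_id : String) (r : List (String × String)) : Bool :=
  (pvRowGet? r "local_language_id" == some lang_id) &&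
  !(pvClean (pvRowGet? r text_key) == "") &&
  (pvRowGet? r id_key).isSome

def pvMk (id_key text_key order_key : String) (r : List (String × String)) : String × Int × String :=
  ((pvRowGet? r id_key).getD "", pvSafeInt (pvRowGet? r order_key), pvClean (pvRowGet? r text_key))

-- A's loop step on a triple
def pvStepA (d : PySem.Dict String (Int × String)) (tr : String × Int × String) : PySem.Dict String (Int × String) :=
  match d.get? tr.1 with
  | none => d.insert tr.1 tr.2
  | some prev => if tr.2.1 ≥ prev.1 then d.insert tr.1 tr.2 else d

-- B's grouping step on a triple
def pvStepB (d : PySem.Dict String (List (Int × String))) (tr : String × Int × String) : PySem.Dict String (List (Int × String)) :=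
  d.modify tr.1 [] (fun g => g ++ [tr.2])

-- B's per-group reduction: last pair attaining the maximal order, then its text
def pvBest (g : List (Int × String)) : String :=
  match g with
  | [] => ""
  | p0 :: rest => (rest.foldl (fun best p => if p.1 ≥ best.1 then p else best) p0).2

-- the running-best reduction A performs per key, on Option state
def pvRed (o : Option (Int × String)) (p : Int × String) : Option (Int × String) :=
  some (match o with | none => p | some q => if p.1 ≥ q.1 then p else q)

theorem pvBodyA_eq (id_key text_key lang_id order_key : String) (d : PySem.Dict String (Int × String)) (r : List (String × String)) :
    (if pvRowGet? r "local_language_id" ≠ some lang_id then d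
     else
       let text := pvClean (pvRowGet? r text_key)
       if text = "" then d
       else
         let oid := pvSafeInt (pvRowGet? r order_key)
         match pvRowGet? r id_key with
         | none => d
         | some key =>
           match d.get? key with
           | none => d.insert key (oid, text)
           | some prev => if oid ≥ prev.1 then d.insert key (oid, text) else d)
    = if pvPass id_key text_key lang_id r then pvStepA d (pvMk id_key text_key order_key r) else d := by
  by_cases hl : pvRowGet? r "local_language_id" = some lang_id
  · by_cases ht : pvClean (pvRowGet? r text_key) = ""
    · simp [pvPass, hl, ht]
    · cases hk : pvRowGet? r id_key with
      | none => simp [pvPass, hl, ht, hk]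
      | some key => simp [pvPass, pvStepA, pvMk, hl, ht, hk]
  · simp [pvPass, hl]

theorem pvBodyB_eq (id_key text_key lang_id order_key : String) (d : PySem.Dict String (List (Int × String))) (r : List (String × String)) :
    (if pvRowGet? r "local_language_id" ≠ some lang_id then d
     else
       let text := pvClean (pvRowGet? r text_key)
       if text = "" then d
       else
         match pvRowGet? r id_key with
         | none => d
         | some key => d.modify key [] (fun g => g ++ [(pvSafeInt (pvRowGet? r order_key), text)]))
    = if pvPass id_key text_key lang_id r then pvStepB d (pvMk id_key text_key order_key r) else d := by
  by_cases hl : pvRowGet? r "local_language_id" = some lang_id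
  · by_cases ht : pvClean (pvRowGet? r text_key) = ""
    · simp [pvPass, hl, ht]
    · cases hk : pvRowGet? r id_key with
      | none => simp [pvPass, hl, ht, hk]
      | some key => simp [pvPass, pvStepB, pvMk, hl, ht, hk]
  · simp [pvPass, hl]

-- per-key content of A's fold
theorem pvFoldA_get? (ts : List (String × Int × String)) (d : PySem.Dict String (Int × String)) (k : String) :
    (ts.foldl pvStepA d).get? k = ((ts.filter (fun tr => tr.1 == k)).map (·.2)).foldl pvRed (d.get? k) := by
  induction ts generalizing d with
  | nil => rfl
  | cons tr ts ih =>
    by_cases hk : tr.1 = k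
    · have hstep : (pvStepA d tr).get? k = pvRed (d.get? k) tr.2 := by
        subst hk
        unfold pvStepA pvRed
        cases h : d.get? tr.1 with
        | none => simp [PySem.Dict.get?_insert_self]
        | some prev =>
          by_cases hge : tr.2.1 ≥ prev.1
          · simp [hge, PySem.Dict.get?_insert_self]
          · simp [hge, h]
      rw [List.foldl_cons, ih (pvStepA d tr), hstep,
        List.filter_cons_of_pos (by simp [hk]), List.map_cons, List.foldl_cons]
    · have hstep : (pvStepA d tr).get? k = d.get? k := by
        unfold pvStepA
        cases h : d.get? tr.1 with
        | none => exact PySem.Dict.get?_insert_of_ne d _ (fun h' => hk h'.symm)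
        | some prev =>
          by_cases hge : tr.2.1 ≥ prev.1
          · simp [hge, PySem.Dict.get?_insert_of_ne d _ (fun h' => hk h'.symm)]
          · simp [hge]
      rw [List.foldl_cons, ih (pvStepA d tr), hstep,
        List.filter_cons_of_neg (by simp [hk])]

-- keys of A's fold, with Nodup
theorem pvFoldA_keys (ts : List (String × Int × String)) (d : PySem.Dict String (Int × String)) (hnd : d.keys.Nodup) :
    (ts.foldl pvStepA d).keys = PySem.Set.update d.keys (ts.map (·.1)) ∧ (ts.foldl pvStepA d).keys.Nodup := by
  induction ts generalizing d with
  | nil => exact ⟨rfl, hnd⟩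
  | cons tr ts ih =>
    have hkeys : (pvStepA d tr).keys = PySem.Set.add d.keys tr.1 := by
      cases h : d.get? tr.1 with
      | none =>
        have hc : d.contains tr.1 = false := by
          rw [PySem.Dict.contains_eq_isSome_get?, h]; rfl
        have hmem : tr.1 ∉ d.keys := by
          intro hm
          rw [← PySem.Dict.contains_iff_mem_keys] at hm
          simp [hc] at hm
        rw [show pvStepA d tr = d.insert tr.1 tr.2 by simp [pvStepA, h]]
        rw [PySem.Dict.keys_insert_of_not_contains d tr.2 hc]
        simp [PySem.Set.add, hmem]
      | some prev =>
        have hc : d.contains tr.1 = true := by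
          rw [PySem.Dict.contains_eq_isSome_get?, h]; rfl
        have hmem : tr.1 ∈ d.keys := (PySem.Dict.contains_iff_mem_keys _ _).mp hc
        have hadd : PySem.Set.add d.keys tr.1 = d.keys := by simp [PySem.Set.add, hmem]
        by_cases hge : tr.2.1 ≥ prev.1
        · rw [show pvStepA d tr = d.insert tr.1 tr.2 by simp [pvStepA, h, hge]]
          rw [PySem.Dict.keys_insert_of_contains d tr.2 hc, hadd]
        · rw [show pvStepA d tr = d by simp [pvStepA, h, hge], hadd]
    have hnd' : (pvStepA d tr).keys.Nodup := by
      rw [hkeys]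
      exact PySem.Set.nodup_add _ _ hnd
    have := ih (pvStepA d tr) hnd'
    refine ⟨?_, by rw [List.foldl_cons]; exact this.2⟩
    rw [List.foldl_cons, this.1, hkeys, List.map_cons]
    simp [PySem.Set.update, List.foldl_cons]

-- folding pvRed from a some-state is B's inner best-scan
theorem pvRed_some (ps : List (Int × String)) (q : Int × String) :
    ps.foldl pvRed (some q) = some (ps.foldl (fun best p => if p.1 ≥ best.1 then p else best) q) := by
  induction ps generalizing q with
  | nil => rfl
  | cons p ps ih => simp only [List.foldl_cons, pvRed]; exact ih _

-- ===== VERDICT (by name: the statement is the Claim_ definition above) =====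
theorem latest_localized_text_spec : Claim_equal_latest_localized_text := by
  intro rows id_key text_key lang_id order_key _hdom _hpre
  unfold Spec_latest_localized_text latest_localized_text latest_localized_text_alt
  -- rewrite both row-loops as folds over the common triple list ts
  rw [show (fun (d : PySem.Dict String (Int × String)) r =>
        if pvRowGet? r "local_language_id" ≠ some lang_id then d
        else
          let text := pvClean (pvRowGet? r text_key)
          if text = "" then d
          else
            let oid := pvSafeInt (pvRowGet? r order_key)
            match pvRowGet? r id_key with
            | none => d
            | some key =>
              match d.get? key with
              | none => d.insert key (oid, text)
              | some prev => if oid ≥ prev.1 then d.insert key (oid, text) else d)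
      = fun d r => if pvPass id_key text_key lang_id r then pvStepA d (pvMk id_key text_key order_key r) else d
      from funext fun d => funext fun r => pvBodyA_eq id_key text_key lang_id order_key d r]
  rw [show (fun (d : PySem.Dict String (List (Int × String))) r =>
        if pvRowGet? r "local_language_id" ≠ some lang_id then d
        else
          let text := pvClean (pvRowGet? r text_key)
          if text = "" then d
          else
            match pvRowGet? r id_key with
            | none => d
            | some key => d.modify key [] (fun g => g ++ [(pvSafeInt (pvRowGet? r order_key), text)]))
      = fun d r => if pvPass id_key text_key lang_id r then pvStepB d (pvMk id_key text_key order_key r) else d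
      from funext fun d => funext fun r => pvBodyB_eq id_key text_key lang_id order_key d r]
  rw [PySem.List.foldl_if_eq_foldl_filter, PySem.List.foldl_if_eq_foldl_filter]
  set ts := (rows.filter (pvPass id_key text_key lang_id)).map (pvMk id_key text_key order_key) with hts
  have hfA : (rows.filter (pvPass id_key text_key lang_id)).foldl
      (fun d r => pvStepA d (pvMk id_key text_key order_key r)) PySem.Dict.empty
      = ts.foldl pvStepA PySem.Dict.empty := by rw [hts, List.foldl_map]
  have hfB : (rows.filter (pvPass id_key text_key lang_id)).foldl
      (fun d r => pvStepB d (pvMk id_key text_key order_key r)) PySem.Dict.empty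
      = ts.foldl pvStepB PySem.Dict.empty := by rw [hts, List.foldl_map]
  rw [hfA, hfB]
  show ((ts.foldl pvStepA PySem.Dict.empty).items.foldl
          (fun (d : PySem.Dict String String) kv => d.insert kv.1 kv.2.2) PySem.Dict.empty).items
    = ((ts.foldl pvStepB PySem.Dict.empty).items.foldl
          (fun (d : PySem.Dict String String) kg =>
            match kg.2 with
            | [] => d
            | p0 :: rest => d.insert kg.1 (rest.foldl (fun best p => if p.1 ≥ best.1 then p else best) p0).2)
          PySem.Dict.empty).items
  -- characterize A's dict
  set dA := ts.foldl pvStepA PySem.Dict.empty with hdA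
  have hKA := pvFoldA_keys ts PySem.Dict.empty (by simp [PySem.Dict.keys_empty])
  rw [← hdA] at hKA
  have hkeysA : dA.keys = PySem.Set.ofList (ts.map (·.1)) := by
    rw [hKA.1]
    simp [PySem.Set.update, PySem.Set.ofList_eq_foldl, PySem.Dict.keys_empty]
  have hndA : dA.keys.Nodup := hKA.2
  have hitemsA : dA.items = dA.keys.map (fun k => (k, dA.getD k (0, ""))) :=
    PySem.Dict.items_eq_map_keys dA hndA (0, "")
  -- A's final dict-comprehension fold appends one pair per (distinct) key
  have hfreshA : (dA.items.foldl
      (fun (d : PySem.Dict String String) kv => d.insert kv.1 kv.2.2) PySem.Dict.empty).items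
      = dA.items.map (fun kv => (kv.1, kv.2.2)) := by
    rw [PySem.Dict.items_foldl_insert_fresh dA.items (·.1) (fun kv => kv.2.2) PySem.Dict.empty
        (by intro a _; simp [PySem.Dict.contains_empty])
        (by rw [show dA.items.map (·.1) = dA.keys from rfl]; exact hndA)]
    simp [show (PySem.Dict.empty : PySem.Dict String String).items = [] from rfl]
  -- characterize B's groups dict
  set gB := ts.foldl pvStepB PySem.Dict.empty with hgB
  have hkeysB : gB.keys = PySem.Set.ofList (ts.map (·.1)) := by
    rw [hgB]
    unfold pvStepB
    rw [PySem.Dict.keys_foldl_modify_key ts (·.1) [] (fun _ tr g => g ++ [tr.2]) PySem.Dict.empty]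
    simp [PySem.Set.update, PySem.Set.ofList_eq_foldl, PySem.Dict.keys_empty]
  have hndB : gB.keys.Nodup := by
    rw [hgB]
    unfold pvStepB
    exact PySem.Dict.nodup_keys_foldl_modify_key ts (·.1) [] (fun _ tr g => g ++ [tr.2]) PySem.Dict.empty
      (by simp [PySem.Dict.keys_empty])
  have hgetB : ∀ k, gB.getD k [] = (ts.filter (fun tr => tr.1 == k)).map (·.2) := by
    intro k
    rw [hgB]
    unfold pvStepB
    rw [PySem.Dict.getD_foldl_modify_append ts PySem.Dict.empty k]
    simp [PySem.Dict.getD_empty]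
  have hitemsB : gB.items = gB.keys.map (fun k => (k, gB.getD k [])) :=
    PySem.Dict.items_eq_map_keys gB hndB []
  -- every stored group is nonempty
  have hgne : ∀ kg ∈ gB.items, kg.2 ≠ [] := by
    intro kg hm
    rw [hitemsB] at hm
    obtain ⟨k, hk, hkg⟩ := List.mem_map.mp hm
    rw [← hkg]
    simp only [hgetB k]
    rw [hkeysB] at hk
    have hk' := (PySem.Set.mem_ofList _ _).mp hk
    obtain ⟨tr, htr, htk⟩ := List.mem_map.mp hk'
    have hmemf : tr ∈ ts.filter (fun tr => tr.1 == k) := List.mem_filter.mpr ⟨htr, by simp [htk]⟩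
    simp only [ne_eq, List.map_eq_nil_iff]
    intro h
    rw [h] at hmemf
    simp at hmemf
  -- B's second loop is a fresh-key insert fold
  have hB2 : (gB.items.foldl (fun (d : PySem.Dict String String) kg =>
        match kg.2 with
        | [] => d
        | p0 :: rest => d.insert kg.1 (rest.foldl (fun best p => if p.1 ≥ best.1 then p else best) p0).2)
        PySem.Dict.empty).items
      = gB.items.map (fun kg => (kg.1, pvBest kg.2)) := by
    rw [PySem.List.foldl_congr_mem gB.items _
        (fun (d : PySem.Dict String String) kg => d.insert kg.1 (pvBest kg.2)) _
        (by
          intro acc kg hm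
          have := hgne kg hm
          cases h : kg.2 with
          | nil => exact absurd h this
          | cons p0 rest => simp [h, pvBest])]
    rw [PySem.Dict.items_foldl_insert_fresh gB.items (·.1) (fun kg => pvBest kg.2) PySem.Dict.empty
        (by intro a _; simp [PySem.Dict.contains_empty])
        (by rw [show gB.items.map (·.1) = gB.keys from rfl]; exact hndB)]
    simp [show (PySem.Dict.empty : PySem.Dict String String).items = [] from rfl]
  rw [hfreshA, hB2, hitemsA, hitemsB, hkeysA, hkeysB]
  simp only [List.map_map]
  apply List.map_congr_left
  intro k hk
  have hk' := (PySem.Set.mem_ofList _ _).mp hk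
  obtain ⟨tr, htr, htk⟩ := List.mem_map.mp hk'
  have hmemf : tr ∈ ts.filter (fun tr => tr.1 == k) := List.mem_filter.mpr ⟨htr, by simp [htk]⟩
  simp only [Function.comp]
  -- A's value at k is the pvRed fold over k's group
  have hvalA : dA.getD k (0, "") = (((ts.filter (fun tr => tr.1 == k)).map (·.2)).foldl pvRed none).getD (0, "") := by
    rw [PySem.Dict.getD_eq_get?_getD, hdA, pvFoldA_get?, PySem.Dict.get?_empty]
  rw [hgetB k, hvalA]
  cases h : (ts.filter (fun tr => tr.1 == k)).map (·.2) with
  | nil =>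
    rw [List.map_eq_nil_iff] at h
    rw [h] at hmemf
    simp at hmemf
  | cons p0 rest =>
    simp only [List.foldl_cons, pvBest]
    rw [show pvRed none p0 = some p0 from rfl, pvRed_some]
    simp
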